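-- pv_equiv track=rewrite | github.com/Mehmet-yilmaz0/communication-server-project | kriptoloji/route_cipher.py | _read_column_up
-- ===== SOURCE A (Python) =====
-- def _read_column_up(matrix: list) -> str:
--     """
--     Matrisi sütun sütun, aşağıdan yukarıya okur.
--
--     Args:
--         matrix: Matris
--
--     Returns:
--         Okunan metin
--     """
--     if not matrix or not matrix[0]:
--         return ""
--
--     rows = len(matrix)
--     cols = len(matrix[0])
--     result = []
--
--     for j in range(cols):
--         for i in range(rows - 1, -1, -1):
--             result.append(matrix[i][j])
--
--     return ''.join(result)
-- ===== SOURCE B (Python) =====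
-- def _read_column_up(matrix: list) -> str:
--     """Row-major single pass: walk the rows bottom-to-top once, zipping each
--     row onto per-column accumulators, then join the columns."""
--     if not matrix or not matrix[0]:
--         return ""
--     bufs = [[] for _ in matrix[0]]
--     for row in reversed(matrix):
--         for b, cell in zip(bufs, row):
--             b.append(cell)
--     return ''.join(''.join(b) for b in bufs)
-- ===== Notes on version B (the rewrite author's own statement) =====
-- stated objective: alternative
-- what changed: Replaces A's column-major double index loop (for each column, index cells bottom-to-top) with a single row-major bottom-to-top pass that zips each row onto per-column accumulators and joins them at the end.
import Mathlib
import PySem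

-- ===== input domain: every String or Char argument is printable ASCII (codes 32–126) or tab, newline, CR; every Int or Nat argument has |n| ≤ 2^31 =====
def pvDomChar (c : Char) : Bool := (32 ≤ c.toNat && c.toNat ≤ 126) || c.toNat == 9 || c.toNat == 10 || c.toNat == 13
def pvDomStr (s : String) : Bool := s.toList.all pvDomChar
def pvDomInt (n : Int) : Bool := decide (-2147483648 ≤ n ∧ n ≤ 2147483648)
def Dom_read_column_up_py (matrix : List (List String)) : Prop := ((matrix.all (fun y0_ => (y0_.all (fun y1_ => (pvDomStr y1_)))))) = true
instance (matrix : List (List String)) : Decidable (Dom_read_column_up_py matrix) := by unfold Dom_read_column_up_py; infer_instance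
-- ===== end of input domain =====

-- B reads the matrix row-major in one bottom-to-top pass, zipping each row onto
-- per-column accumulators, instead of A's column-major double index loop (objective: alternative/idiomatic).

-- ===== PORT A =====
def read_column_up_py (matrix : List (List String)) : String :=
  match matrix with
  | [] => ""                                   -- if not matrix
  | r0 :: _ =>
    if r0 = [] then ""                         -- or not matrix[0]
    else
      let rows : Int := PySem.List.len matrix
      let cols : Int := PySem.List.len r0
      let result : List String :=
        (PySem.List.pyRange 0 cols 1).foldl (fun acc j =>
          (PySem.List.pyRange (rows - 1) (-1) (-1)).foldl (fun acc i =>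
            acc ++ [PySem.List.pyGetD (PySem.List.pyGetD matrix i []) j ""]) acc) []
      PySem.Str.join "" result

-- ===== PORT B =====
def read_column_up_py_alt (matrix : List (List String)) : String :=
  match matrix with
  | [] => ""
  | r0 :: _ =>
    if r0 = [] then ""
    else
      let bufs0 : List (List String) := r0.map (fun _ => ([] : List String))
      -- for b, cell in zip(bufs, row): b.append(cell)  — buffers past the
      -- zipped prefix are left untouched
      let bufs := matrix.reverse.foldl
        (fun bufs row =>
          (bufs.zip row).map (fun p => p.1 ++ [p.2]) ++ bufs.drop row.length) bufs0
      PySem.Str.join "" (bufs.map (fun b => PySem.Str.join "" b))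

-- ===== PRECONDITION & SPEC =====
-- Pre_ excludes only ragged matrices whose first row is longer than some other
-- row: there A raises IndexError (matrix[i][j] with j ≥ len(matrix[i])).
def Pre_read_column_up_py (matrix : List (List String)) : Prop :=
  ∀ row ∈ matrix, (matrix.headD []).length ≤ row.length
instance (matrix : List (List String)) : Decidable (Pre_read_column_up_py matrix) := by
  unfold Pre_read_column_up_py; infer_instance
def pvWitness_read_column_up_py : List (List String) := [["a", "b"], ["c", "d"]]

def Spec_read_column_up_py (matrix : List (List String)) (out : String) : Prop :=
  out = read_column_up_py_alt matrix
instance (matrix : List (List String)) (out : String) : Decidable (Spec_read_column_up_py matrix out) := by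
  unfold Spec_read_column_up_py; infer_instance

-- ===== CLAIM (what is proved, stated in full; the proofs are below) =====
def Claim_equal_read_column_up_py : Prop := ∀ (matrix : List (List String)), Dom_read_column_up_py matrix → Pre_read_column_up_py matrix → Spec_read_column_up_py matrix (read_column_up_py matrix)

-- ===== LEMMAS AND PROOFS =====

-- ''.join concatenates, on the char-list side.
lemma chars_join_nil_eq_flatten (css : List (List Char)) :
    PySem.Chars.join [] css = css.flatten := by
  show List.intercalate [] css = css.flatten
  induction css with
  | nil => rfl
  | cons c cs ih =>
    cases cs with
    | nil => simp [List.intercalate]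
    | cons d ds => simp_all [List.intercalate, List.intersperse]

-- joining a flatMap column-by-column equals joining per-column joins.
lemma join_flatMap_eq {α : Type} (L : List α) (col : α → List String) :
    PySem.Str.join "" (L.flatMap col)
      = PySem.Str.join "" (L.map (fun j => PySem.Str.join "" (col j))) := by
  apply String.toList_injective
  have he : ("" : String).toList = [] := rfl
  simp only [PySem.Str.toList_join, he, chars_join_nil_eq_flatten, List.map_flatMap,
    List.map_map, Function.comp_def]
  induction L with
  | nil => rfl
  | cons x xs ih => simp [ih]

-- one step of B's loop: zipping a sufficiently long row onto indexed buffers.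
lemma zip_step (k : Nat) (f : Nat → List String) (r : List String) (hr : k ≤ r.length) :
    (((List.range k).map f).zip r).map (fun p => p.1 ++ [p.2])
      = (List.range k).map (fun j => f j ++ [r.getD j ""]) := by
  apply List.ext_getElem
  · simp [Nat.min_eq_left hr]
  · intro i h1 h2
    have hik : i < k := by simpa using h2
    have hir : i < r.length := lt_of_lt_of_le hik hr
    simp [List.getElem_zip, List.getD, List.getElem?_eq_getElem hir]

-- B's loop invariant: buffers collect, per column, the cells of the rows seen so far.
lemma bufs_fold (rs : List (List String)) (k : Nat) (f : Nat → List String)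
    (h : ∀ row ∈ rs, k ≤ row.length) :
    rs.foldl (fun bufs row =>
          (bufs.zip row).map (fun p => p.1 ++ [p.2]) ++ bufs.drop row.length)
        ((List.range k).map f)
      = (List.range k).map (fun j => f j ++ rs.map (fun row => row.getD j "")) := by
  induction rs generalizing f with
  | nil => simp
  | cons r rs ih =>
    have hr : k ≤ r.length := h r (by simp)
    have hnil : ((List.range k).map f).drop r.length = [] :=
      List.drop_eq_nil_of_le (by simpa using hr)
    simp only [List.foldl_cons, zip_step k f r hr, hnil, List.append_nil]
    rw [ih (fun j => f j ++ [r.getD j ""]) (fun row hm => h row (by simp [hm]))]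
    simp [List.append_assoc]

-- A's result list is a flatMap of bottom-to-top columns.
lemma a_list_eq (matrix : List (List String)) (r0 : List String) :
    (PySem.List.pyRange 0 (PySem.List.len r0) 1).foldl (fun acc j =>
        (PySem.List.pyRange (PySem.List.len matrix - 1) (-1) (-1)).foldl (fun acc i =>
          acc ++ [PySem.List.pyGetD (PySem.List.pyGetD matrix i []) j ""]) acc) []
      = (List.range r0.length).flatMap
          (fun j => matrix.reverse.map (fun row => row.getD j "")) := by
  have hcol : ∀ j : Int,
      (PySem.List.pyRange (PySem.List.len matrix - 1) (-1) (-1)).map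
          (fun i => PySem.List.pyGetD (PySem.List.pyGetD matrix i []) j "")
        = matrix.reverse.map (fun row => PySem.List.pyGetD row j "") := by
    intro j
    have h0 : PySem.List.pyRange (PySem.List.len matrix - 1) (-1) (-1)
        = (PySem.List.pyRange 0 (PySem.List.len matrix) 1).reverse := by
      have := PySem.List.pyRange_neg_one_eq_reverse (PySem.List.len matrix - 1) (-1)
      simpa using this
    rw [h0, List.map_reverse]
    have : (PySem.List.pyRange 0 (PySem.List.len matrix) 1).map
        (fun i => PySem.List.pyGetD (PySem.List.pyGetD matrix i []) j "")
        = ((PySem.List.pyRange 0 (PySem.List.len matrix) 1).map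
            (fun i => PySem.List.pyGetD matrix i [])).map
            (fun row => PySem.List.pyGetD row j "") := by
      simp [List.map_map, Function.comp_def]
    rw [this, PySem.List.map_pyGetD_pyRange_zero]
    simp
  calc (PySem.List.pyRange 0 (PySem.List.len r0) 1).foldl (fun acc j =>
          (PySem.List.pyRange (PySem.List.len matrix - 1) (-1) (-1)).foldl (fun acc i =>
            acc ++ [PySem.List.pyGetD (PySem.List.pyGetD matrix i []) j ""]) acc) []
      = (PySem.List.pyRange 0 (PySem.List.len r0) 1).foldl (fun acc j =>
          acc ++ matrix.reverse.map (fun row => PySem.List.pyGetD row j "")) [] := by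
        apply List.foldl_ext
        intro acc j _
        rw [PySem.List.foldl_append_singleton_eq_map, hcol j]
    _ = (PySem.List.pyRange 0 (PySem.List.len r0) 1).flatMap
          (fun j => matrix.reverse.map (fun row => PySem.List.pyGetD row j "")) := by
        rw [PySem.List.foldl_append_eq_flatMap]; rfl
    _ = (List.range r0.length).flatMap
          (fun j => matrix.reverse.map (fun row => row.getD j "")) := by
        have : PySem.List.pyRange 0 (PySem.List.len r0) 1
            = (List.range r0.length).map (fun k : Nat => (k : Int)) := by
          simpa [PySem.List.len_eq] using PySem.List.pyRange_zero_nat r0.length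
        rw [this, List.flatMap_map]
        simp [PySem.List.pyGetD_natCast]

-- ===== VERDICT (by name: the statement is the Claim_ definition above) =====
theorem read_column_up_py_spec : Claim_equal_read_column_up_py := by
  intro matrix _ hpre
  unfold Spec_read_column_up_py read_column_up_py read_column_up_py_alt
  match hm : matrix with
  | [] => rfl
  | r0 :: rest =>
    by_cases h0 : r0 = []
    · simp [h0]
    · simp only [h0, if_false]
      rw [a_list_eq (r0 :: rest) r0]
      have hb0 : r0.map (fun _ => ([] : List String))
          = (List.range r0.length).map (fun _ => ([] : List String)) := by
        simp [List.map_const']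
      rw [hb0, bufs_fold ((r0 :: rest).reverse) r0.length (fun _ => [])
        (by intro row hrow
            simpa using hpre row (List.mem_reverse.mp hrow))]
      rw [join_flatMap_eq]
      simp [Function.comp_def]
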